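-- pv_equiv track=rewrite | github.com/pyhub-apps/pyhub-office-automation | pyhub_office_automation/excel/engines/macos.py | _parse_applescript_list
-- ===== SOURCE A (Python) =====
-- from typing import Any, Dict, List, Optional
--
-- def _parse_applescript_list(output: str) -> List:
--     """AppleScript list 출력을 Python list로 변환"""
--     if not output:
--         return []
--
--     # AppleScript list: "{item1, item2, item3}"
--     output = output.strip()
--     if output.startswith("{") and output.endswith("}"):
--         output = output[1:-1]
--
--     # 빈 리스트
--     if not output:
--         return []
--
--     # 콤마로 분할 (중첩 괄호 고려)
--     items = []
--     current = ""
--     depth = 0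
--
--     for char in output:
--         if char == "{":
--             depth += 1
--         elif char == "}":
--             depth -= 1
--         elif char == "," and depth == 0:
--             items.append(current.strip())
--             current = ""
--             continue
--         current += char
--
--     if current:
--         items.append(current.strip())
--
--     return items
-- ===== SOURCE B (Python) =====
-- from typing import List
--
--
-- def _parse_applescript_list(output: str) -> List:
--     """Two-pass variant: collect depth-0 comma indices, then slice between them."""
--     if not output:
--         return []
--
--     s = output.strip()
--     if s.startswith("{") and s.endswith("}"):
--         s = s[1:-1]
--
--     if not s:
--         return []
--
--     # pass 1: indices of every comma at brace depth 0
--     cuts = []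
--     depth = 0
--     for i, ch in enumerate(s):
--         if ch == "{":
--             depth += 1
--         elif ch == "}":
--             depth -= 1
--         elif ch == "," and depth == 0:
--             cuts.append(i)
--
--     # pass 2: slice between consecutive cut points
--     items = []
--     start = 0
--     for i in cuts:
--         items.append(s[start:i].strip())
--         start = i + 1
--
--     last = s[start:]
--     if last:
--         items.append(last.strip())
--
--     return items
-- ===== Notes on version B (the rewrite author's own statement) =====
-- stated objective: alternative
-- what changed: Replaces A's single accumulate-characters-into-current loop by two passes: one depth-tracking scan that only records the indices of depth-0 commas, then a slicing pass that cuts the string between consecutive recorded indices.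
import Mathlib
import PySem

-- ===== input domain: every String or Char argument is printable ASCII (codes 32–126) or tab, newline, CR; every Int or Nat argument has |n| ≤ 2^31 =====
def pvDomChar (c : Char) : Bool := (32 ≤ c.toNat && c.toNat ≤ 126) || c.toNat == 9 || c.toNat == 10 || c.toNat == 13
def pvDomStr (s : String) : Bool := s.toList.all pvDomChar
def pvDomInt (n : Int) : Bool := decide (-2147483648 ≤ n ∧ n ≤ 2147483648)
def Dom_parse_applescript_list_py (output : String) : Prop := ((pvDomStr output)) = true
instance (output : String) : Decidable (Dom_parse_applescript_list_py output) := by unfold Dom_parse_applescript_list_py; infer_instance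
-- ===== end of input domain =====

-- B replaces A's accumulate-into-current loop by index-collect-then-slice (alternative decomposition, same cost class).

-- ===== PORT A =====
-- one step of A's for-loop: state = (items, current, depth)
def pvStepA (st : List String × List Char × Int) (c : Char) : List String × List Char × Int :=
  if c = '{' then (st.1, st.2.1 ++ [c], st.2.2 + 1)
  else if c = '}' then (st.1, st.2.1 ++ [c], st.2.2 - 1)
  else if c = ',' ∧ st.2.2 = 0 then (st.1 ++ [String.ofList (PySem.Chars.strip st.2.1)], [], st.2.2)
  else (st.1, st.2.1 ++ [c], st.2.2)

def parse_applescript_list_py (output : String) : List String :=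
  if output.toList.isEmpty then []
  else
    let cs := PySem.Chars.strip output.toList
    let cs := if PySem.Chars.startswith cs ['{'] && PySem.Chars.endswith cs ['}']
              then PySem.List.slice cs (some 1) (some (-1)) else cs
    if cs.isEmpty then []
    else
      let st := cs.foldl pvStepA ([], [], 0)
      if st.2.1.isEmpty then st.1
      else st.1 ++ [String.ofList (PySem.Chars.strip st.2.1)]

-- ===== PORT B =====
-- pass 1 step: state = (depth, cut indices); input from enumerate
def pvStepB1 (st : Int × List Int) (p : Int × Char) : Int × List Int :=
  if p.2 = '{' then (st.1 + 1, st.2)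
  else if p.2 = '}' then (st.1 - 1, st.2)
  else if p.2 = ',' ∧ st.1 = 0 then (st.1, st.2 ++ [p.1])
  else (st.1, st.2)

-- pass 2 step: state = (items, start)
def pvStepB2 (cs : List Char) (st : List String × Int) (i : Int) : List String × Int :=
  (st.1 ++ [String.ofList (PySem.Chars.strip (PySem.List.slice cs (some st.2) (some i)))], i + 1)

def parse_applescript_list_py_alt (output : String) : List String :=
  if output.toList.isEmpty then []
  else
    let cs := PySem.Chars.strip output.toList
    let cs := if PySem.Chars.startswith cs ['{'] && PySem.Chars.endswith cs ['}']
              then PySem.List.slice cs (some 1) (some (-1)) else cs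
    if cs.isEmpty then []
    else
      let cuts := ((PySem.List.enumerate cs 0).foldl pvStepB1 (0, [])).2
      let st := cuts.foldl (pvStepB2 cs) ([], 0)
      let last := PySem.List.slice cs (some st.2) none
      if last.isEmpty then st.1
      else st.1 ++ [String.ofList (PySem.Chars.strip last)]

-- ===== PRECONDITION & SPEC =====
def Spec_parse_applescript_list_py (output : String) (out : List String) : Prop := out = parse_applescript_list_py_alt output
instance (output : String) (out : List String) : Decidable (Spec_parse_applescript_list_py output out) := by unfold Spec_parse_applescript_list_py; infer_instance

-- ===== CLAIM (what is proved, stated in full; the proofs are below) =====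
def Claim_equal_parse_applescript_list_py : Prop := ∀ (output : String), Dom_parse_applescript_list_py output → Spec_parse_applescript_list_py output (parse_applescript_list_py output)

-- ===== LEMMAS AND PROOFS =====

-- reference splitter: (completed raw segments, final raw current)
def pvSegs : List Char → Int → List Char → List (List Char) × List Char
  | [], _, cur => ([], cur)
  | c :: r, d, cur =>
    if c = '{' then pvSegs r (d + 1) (cur ++ [c])
    else if c = '}' then pvSegs r (d - 1) (cur ++ [c])
    else if c = ',' ∧ d = 0 then
      let p := pvSegs r d []
      (cur :: p.1, p.2)
    else pvSegs r d (cur ++ [c])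

def pvDepth : List Char → Int → Int
  | [], d => d
  | c :: r, d =>
    if c = '{' then pvDepth r (d + 1)
    else if c = '}' then pvDepth r (d - 1)
    else pvDepth r d

def pvCuts : List Char → Int → Int → List Int
  | [], _, _ => []
  | c :: r, j, d =>
    if c = '{' then pvCuts r (j + 1) (d + 1)
    else if c = '}' then pvCuts r (j + 1) (d - 1)
    else if c = ',' ∧ d = 0 then j :: pvCuts r (j + 1) d
    else pvCuts r (j + 1) d

lemma pvFoldA (l : List Char) : ∀ (items : List String) (cur : List Char) (d : Int),
    l.foldl pvStepA (items, cur, d) =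
      (items ++ (pvSegs l d cur).1.map (fun seg => String.ofList (PySem.Chars.strip seg)),
       (pvSegs l d cur).2, pvDepth l d) := by
  induction l with
  | nil => intro items cur d; simp [pvSegs, pvDepth]
  | cons c r ih =>
    intro items cur d
    simp only [List.foldl_cons]
    by_cases h1 : c = '{'
    · simp [pvStepA, pvSegs, pvDepth, h1, ih]
    by_cases h2 : c = '}'
    · simp [pvStepA, pvSegs, pvDepth, h2, ih]
    by_cases h3 : c = ',' ∧ d = 0
    · simp [pvStepA, pvSegs, pvDepth, h3, ih]
    · simp [pvStepA, pvSegs, pvDepth, h1, h2, h3, ih]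

lemma pvFoldB1 (l : List Char) : ∀ (j : Int) (d : Int) (acc : List Int),
    (PySem.List.enumerate l j).foldl pvStepB1 (d, acc) = (pvDepth l d, acc ++ pvCuts l j d) := by
  induction l with
  | nil => intro j d acc; simp [PySem.List.enumerate_nil, pvDepth, pvCuts]
  | cons c r ih =>
    intro j d acc
    rw [PySem.List.enumerate_cons]
    simp only [List.foldl_cons]
    by_cases h1 : c = '{'
    · simp [pvStepB1, pvDepth, pvCuts, h1, ih]
    by_cases h2 : c = '}'
    · simp [pvStepB1, pvDepth, pvCuts, h2, ih]
    by_cases h3 : c = ',' ∧ d = 0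
    · simp [pvStepB1, pvDepth, pvCuts, h3, ih]
    · simp [pvStepB1, pvDepth, pvCuts, h1, h2, h3, ih]

lemma pvB2_init (s : List Char) (l : List Int) : ∀ (items : List String) (st : Int),
    l.foldl (pvStepB2 s) (items, st) =
      (items ++ (l.foldl (pvStepB2 s) ([], st)).1, (l.foldl (pvStepB2 s) ([], st)).2) := by
  induction l with
  | nil => intro items st; simp
  | cons i r ih =>
    intro items st
    simp only [List.foldl_cons, pvStepB2]
    rw [ih (items ++ [_]), ih ([] ++ [_])]
    simp

lemma pvFoldB2 (s : List Char) (l : List Char) : ∀ (j : Nat), l = s.drop j →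
    ∀ (d : Int) (start : Nat), start ≤ j →
    ∃ (fin : Nat),
      (pvCuts l (j : Int) d).foldl (pvStepB2 s) (([] : List String), ((start : Nat) : Int)) =
        ((pvSegs l d ((s.take j).drop start)).1.map (fun seg => String.ofList (PySem.Chars.strip seg)), (fin : Int))
      ∧ s.drop fin = (pvSegs l d ((s.take j).drop start)).2 := by
  induction l with
  | nil =>
    intro j hj d start hs
    refine ⟨start, by simp [pvCuts, pvSegs], ?_⟩
    have hlen : s.length ≤ j := List.drop_eq_nil_iff.mp hj.symm
    rw [pvSegs, List.take_of_length_le hlen]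
  | cons c r ih =>
    intro j hj d start hs
    have hlt : j < s.length := by
      by_contra h
      rw [List.drop_eq_nil_of_le (by omega)] at hj
      exact (List.cons_ne_nil c r) hj
    have hr : r = s.drop (j + 1) := by
      rw [Eq.symm List.drop_drop, ← hj]; rfl
    have hc : c = s[j] := by
      have h0 : (s.drop j)[0]? = some c := by rw [← hj]; rfl
      rw [List.getElem?_drop] at h0
      simp [List.getElem?_eq_some_iff] at h0
      obtain ⟨_, h0⟩ := h0
      exact h0.symm
    have htake : s.take (j+1) = s.take j ++ [c] := by
      rw [List.take_succ_eq_append_getElem hlt, hc]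
    have hcur : (s.take (j+1)).drop start = ((s.take j).drop start) ++ [c] := by
      rw [htake, List.drop_append_of_le_length (by simp; omega)]
    have hj1 : ((j : Int) + 1) = (((j+1 : Nat)) : Int) := by push_cast; ring
    by_cases h1 : c = '{'
    · obtain ⟨fin, e1, e2⟩ := ih (j+1) hr (d+1) start (by omega)
      rw [hcur] at e1 e2
      rw [pvCuts, if_pos h1, pvSegs, if_pos h1, hj1]
      exact ⟨fin, e1, e2⟩
    by_cases h2 : c = '}'
    · obtain ⟨fin, e1, e2⟩ := ih (j+1) hr (d-1) start (by omega)
      rw [hcur] at e1 e2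
      rw [pvCuts, if_neg h1, if_pos h2, pvSegs, if_neg h1, if_pos h2, hj1]
      exact ⟨fin, e1, e2⟩
    by_cases h3 : c = ',' ∧ d = 0
    · obtain ⟨fin, e1, e2⟩ := ih (j+1) hr d (j+1) (by omega)
      have hnil : (s.take (j+1)).drop (j+1) = [] :=
        List.drop_eq_nil_of_le (by simp)
      rw [hnil] at e1 e2
      have hslice : PySem.List.slice s (some ((start : Nat) : Int)) (some ((j : Nat) : Int))
          = (s.take j).drop start := by
        rw [PySem.List.slice_natCast, List.drop_take]
      rw [pvCuts, if_neg h1, if_neg h2, if_pos h3, pvSegs, if_neg h1, if_neg h2, if_pos h3]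
      refine ⟨fin, ?_, e2⟩
      simp only [List.foldl_cons, pvStepB2, List.nil_append]
      rw [pvB2_init, hslice, hj1, e1]
      simp
    · obtain ⟨fin, e1, e2⟩ := ih (j+1) hr d start (by omega)
      rw [hcur] at e1 e2
      rw [pvCuts, if_neg h1, if_neg h2, if_neg h3, pvSegs, if_neg h1, if_neg h2, if_neg h3, hj1]
      exact ⟨fin, e1, e2⟩

-- ===== VERDICT (by name: the statement is the Claim_ definition above) =====
theorem parse_applescript_list_py_spec : Claim_equal_parse_applescript_list_py := by
  intro output _
  unfold Spec_parse_applescript_list_py parse_applescript_list_py parse_applescript_list_py_alt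
  by_cases h0 : output.toList.isEmpty
  · simp [h0]
  simp only [h0, Bool.false_eq_true, if_false]
  by_cases h1 : (if (PySem.Chars.startswith (PySem.Chars.strip output.toList) ['{'] &&
        PySem.Chars.endswith (PySem.Chars.strip output.toList) ['}']) = true
      then PySem.List.slice (PySem.Chars.strip output.toList) (some 1) (some (-1))
      else PySem.Chars.strip output.toList).isEmpty
  · simp only [h1, if_true]
  simp only [h1, Bool.false_eq_true, if_false]
  set cs := (if (PySem.Chars.startswith (PySem.Chars.strip output.toList) ['{'] &&
        PySem.Chars.endswith (PySem.Chars.strip output.toList) ['}']) = true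
      then PySem.List.slice (PySem.Chars.strip output.toList) (some 1) (some (-1))
      else PySem.Chars.strip output.toList) with hcs
  obtain ⟨fin, e1, e2⟩ := pvFoldB2 cs cs 0 (by simp) 0 0 (le_refl 0)
  simp only [List.take_zero, List.drop_nil, Nat.cast_zero] at e1 e2
  rw [pvFoldA, pvFoldB1]
  simp only [List.nil_append]
  rw [e1]
  simp only [PySem.List.slice_from_natCast, e2]
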